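-- pv_equiv track=rewrite | github.com/incertae-sedis/smof | smof/main.py | ambiguous2perl
-- ===== SOURCE A (Python) =====
-- class Maps:
--     DNA_AMB = {
--         "R": "AG",
--         "Y": "CT",
--         "S": "GC",
--         "W": "AT",
--         "K": "GT",
--         "M": "AC",
--         "B": "CGT",
--         "D": "AGT",
--         "H": "ACT",
--         "V": "ACG",
--         "N": "ACGT",
--     }
--
-- def ambiguous2perl(pattern):
--     perlpat = []
--     in_bracket = False
--     escaped = False
--     for c in pattern:
--         amb = c in Maps.DNA_AMB
--         if c == "\\":
--             escaped = True
--             continue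
--         elif escaped:
--             c = c if amb else "\\" + c
--             escaped = False
--         elif amb:
--             v = Maps.DNA_AMB[c]
--             c = v if in_bracket else "[%s]" % v
--         elif c == "[":
--             in_bracket = True
--         elif c == "]":
--             in_bracket = False
--         perlpat.append(c)
--     return "".join(perlpat)
-- ===== SOURCE B (Python) =====
-- AMB = {"R":"AG","Y":"CT","S":"GC","W":"AT","K":"GT","M":"AC",
--        "B":"CGT","D":"AGT","H":"ACT","V":"ACG","N":"ACGT"}
--
-- def _tokenize(pattern):
--     """Pass 1: turn the string into (escaped, char) tokens.
--     A run of backslashes escapes the single following character;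
--     a trailing run of backslashes yields no token."""
--     toks = []
--     i, n = 0, len(pattern)
--     while i < n:
--         if pattern[i] == "\\":
--             while i < n and pattern[i] == "\\":
--                 i += 1
--             if i < n:
--                 toks.append((True, pattern[i]))
--                 i += 1
--         else:
--             toks.append((False, pattern[i]))
--             i += 1
--     return toks
--
-- def _annotate(toks):
--     """Pass 2: attach to each token the bracket state in force when it is read;
--     only unescaped '['/']' toggle the state."""
--     out = []
--     inb = False
--     for esc, c in toks:
--         out.append((esc, c, inb))
--         if not esc:
--             if c == "[":
--                 inb = True
--             elif c == "]":
--                 inb = False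
--     return out
--
-- def _render(esc, c, inb):
--     """Pass 3: one token -> its output piece."""
--     if esc:
--         return c if c in AMB else "\\" + c
--     if c in AMB:
--         v = AMB[c]
--         return v if inb else "[" + v + "]"
--     return c
--
-- def ambiguous2perl(pattern):
--     return "".join(_render(e, c, s) for e, c, s in _annotate(_tokenize(pattern)))
-- ===== Notes on version B (the rewrite author's own statement) =====
-- stated objective: alternative
-- what changed: Replaces A's single stateful loop (escaped flag + bracket flag updated per character) by three staged passes: tokenize the string into (escaped, char) tokens, annotate each token with the bracket state in force, then map each annotated token independently to its output piece.
import Mathlib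
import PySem

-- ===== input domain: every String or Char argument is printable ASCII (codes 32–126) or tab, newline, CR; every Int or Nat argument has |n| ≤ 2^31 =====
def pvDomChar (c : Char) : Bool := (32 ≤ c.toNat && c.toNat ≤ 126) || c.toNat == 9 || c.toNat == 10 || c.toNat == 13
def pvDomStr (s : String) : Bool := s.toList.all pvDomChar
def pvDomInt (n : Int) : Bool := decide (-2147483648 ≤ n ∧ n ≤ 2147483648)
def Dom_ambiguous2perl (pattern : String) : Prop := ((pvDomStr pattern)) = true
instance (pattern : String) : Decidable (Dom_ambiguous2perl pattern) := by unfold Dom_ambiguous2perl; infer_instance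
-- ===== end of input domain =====

-- B restructures A's single stateful loop into three staged passes — tokenize escape pairs,
-- annotate each token with its bracket state, render each token — (objective: alternative
-- decomposition, same cost).


-- shared module constant Maps.DNA_AMB (keys are single characters)
def dnaAmb : Char → Option String
  | 'R' => some "AG"
  | 'Y' => some "CT"
  | 'S' => some "GC"
  | 'W' => some "AT"
  | 'K' => some "GT"
  | 'M' => some "AC"
  | 'B' => some "CGT"
  | 'D' => some "AGT"
  | 'H' => some "ACT"
  | 'V' => some "ACG"
  | 'N' => some "ACGT"
  | _ => none

-- ===== PORT A =====
-- state: (perlpat, in_bracket, escaped); one fold step = one iteration of A's for-loop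
def ambStepA (st : List String × Bool × Bool) (c : Char) : List String × Bool × Bool :=
  let perlpat := st.1
  let in_bracket := st.2.1
  let escaped := st.2.2
  let amb := (dnaAmb c).isSome
  if c = '\\' then (perlpat, in_bracket, true)
  else if escaped then
    (perlpat ++ [if amb then String.ofList [c] else String.ofList ['\\', c]], in_bracket, false)
  else if amb then
    let v := (dnaAmb c).getD ""
    (perlpat ++ [if in_bracket then v else "[" ++ v ++ "]"], in_bracket, escaped)
  else if c = '[' then (perlpat ++ [String.ofList [c]], true, escaped)
  else if c = ']' then (perlpat ++ [String.ofList [c]], false, escaped)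
  else (perlpat ++ [String.ofList [c]], in_bracket, escaped)

def ambiguous2perl (pattern : String) : String :=
  String.join (pattern.toList.foldl ambStepA ([], false, false)).1

-- ===== PORT B =====
-- Pass 1 of Source B (_tokenize): the outer while loop is `tokenize`, the inner
-- backslash-run-skipping loop plus the escaped-token emission is `tokEsc`.
mutual
def tokenize : List Char → List (Bool × Char)
  | [] => []
  | c :: rest => if c = '\\' then tokEsc rest else (false, c) :: tokenize rest

def tokEsc : List Char → List (Bool × Char)
  | [] => []
  | c :: rest => if c = '\\' then tokEsc rest else (true, c) :: tokenize rest
end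

-- Pass 2 of Source B (_annotate): attach the bracket state in force to each token
def annotate : List (Bool × Char) → Bool → List (Bool × Char × Bool)
  | [], _ => []
  | (esc, c) :: rest, inb =>
    (esc, c, inb) ::
      annotate rest
        (if esc then inb else if c = '[' then true else if c = ']' then false else inb)

-- Pass 3 of Source B (_render): one annotated token -> its output piece
def renderTok (esc : Bool) (c : Char) (inb : Bool) : String :=
  if esc then (if (dnaAmb c).isSome then String.ofList [c] else String.ofList ['\\', c])
  else if (dnaAmb c).isSome then
    (if inb then (dnaAmb c).getD "" else "[" ++ (dnaAmb c).getD "" ++ "]")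
  else String.ofList [c]

def ambiguous2perl_alt (pattern : String) : String :=
  String.join ((annotate (tokenize pattern.toList) false).map
    (fun t => renderTok t.1 t.2.1 t.2.2))

-- ===== PRECONDITION & SPEC =====
def Spec_ambiguous2perl (pattern : String) (out : String) : Prop := out = ambiguous2perl_alt pattern
instance (pattern : String) (out : String) : Decidable (Spec_ambiguous2perl pattern out) := by unfold Spec_ambiguous2perl; infer_instance

-- ===== CLAIM (what is proved, stated in full; the proofs are below) =====
def Claim_equal_ambiguous2perl : Prop := ∀ (pattern : String), Dom_ambiguous2perl pattern → Spec_ambiguous2perl pattern (ambiguous2perl pattern)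

-- ===== LEMMAS AND PROOFS =====

-- A's fold from an unescaped state equals acc ++ (render ∘ annotate) of `tokenize`,
-- and from an escaped state the same with `tokEsc`.
theorem ambFold_eq (l : List Char) :
    (∀ (acc : List String) (inb : Bool),
      (l.foldl ambStepA (acc, inb, false)).1
        = acc ++ (annotate (tokenize l) inb).map (fun t => renderTok t.1 t.2.1 t.2.2)) ∧
    (∀ (acc : List String) (inb : Bool),
      (l.foldl ambStepA (acc, inb, true)).1
        = acc ++ (annotate (tokEsc l) inb).map (fun t => renderTok t.1 t.2.1 t.2.2)) := by
  induction l with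
  | nil => simp [tokenize, tokEsc, annotate]
  | cons c rest ih =>
    constructor
    · intro acc inb
      by_cases hbs : c = '\\'
      · simp [hbs, List.foldl_cons, ambStepA, tokenize, ih.2]
      · by_cases hamb : (dnaAmb c).isSome
        · have hlb : ¬ c = '[' := by rintro rfl; simp [dnaAmb] at hamb
          have hrb : ¬ c = ']' := by rintro rfl; simp [dnaAmb] at hamb
          simp [List.foldl_cons, ambStepA, hbs, hamb, tokenize, annotate, renderTok,
            hlb, hrb, ih.1]
        · by_cases hlb : c = '['
          · simp [hlb, List.foldl_cons, ambStepA, dnaAmb, tokenize, annotate, renderTok, ih.1]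
          · by_cases hrb : c = ']'
            · simp [hrb, List.foldl_cons, ambStepA, dnaAmb, tokenize, annotate, renderTok, ih.1]
            · simp [List.foldl_cons, ambStepA, hbs, hamb, hlb, hrb, tokenize, annotate,
                renderTok, ih.1]
    · intro acc inb
      by_cases hbs : c = '\\'
      · simp [hbs, List.foldl_cons, ambStepA, tokEsc, ih.2]
      · simp [List.foldl_cons, ambStepA, hbs, tokEsc, annotate, renderTok, ih.1]

-- ===== VERDICT (by name: the statement is the Claim_ definition above) =====
theorem ambiguous2perl_spec : Claim_equal_ambiguous2perl := by
  intro pattern _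
  unfold Spec_ambiguous2perl ambiguous2perl ambiguous2perl_alt
  rw [(ambFold_eq pattern.toList).1 [] false]
  simp
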